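-- pv_equiv track=rewrite | github.com/theozvill/Projet-Decision | projet.py | calcul_d_approbation
-- ===== SOURCE A (Python) =====
-- def calcul_d_approbation(p):
--     d = {}
--
--     m = len(p[0])
--     for k in range(m):
--         for j in range(k+1, m):
--             n_kj = 0
--             n_jk = 0
--             for a in p:
--                 if a[k] == 1 and a[j] == 0: n_kj += 1
--                 elif a[k] == 0 and a[j] == 1: n_jk += 1
--             d[(k, j)] = abs(n_kj - n_jk)
--     return d
-- ===== SOURCE B (Python) =====
-- def calcul_d_approbation(p):
--     m = len(p[0])
--     delta = {}
--     for a in p: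
--         ones = [k for k in range(m) if a[k] == 1]
--         zeros = [j for j in range(m) if a[j] == 0]
--         for k in ones:
--             for j in zeros:
--                 if k < j:
--                     delta[(k, j)] = delta.get((k, j), 0) + 1
--                 else:
--                     delta[(j, k)] = delta.get((j, k), 0) - 1
--     return {(k, j): abs(delta.get((k, j), 0)) for k in range(m) for j in range(k + 1, m)}
-- ===== Notes on version B (the rewrite author's own statement) =====
-- stated objective: faster
-- what changed: A scans all rows once per column pair (column-pair-major triple loop); B makes one row-major pass that sparsely accumulates a signed difference dict over each row's 1-indices x 0-indices, then emits abs values per pair, so pair work arises only where rows actually hold a 1 and a 0.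
-- outside the precondition, e.g. on calcul_d_approbation([[0, 1], [2]]): A returns {(0, 1): 1}, B raises IndexError
import Mathlib
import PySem

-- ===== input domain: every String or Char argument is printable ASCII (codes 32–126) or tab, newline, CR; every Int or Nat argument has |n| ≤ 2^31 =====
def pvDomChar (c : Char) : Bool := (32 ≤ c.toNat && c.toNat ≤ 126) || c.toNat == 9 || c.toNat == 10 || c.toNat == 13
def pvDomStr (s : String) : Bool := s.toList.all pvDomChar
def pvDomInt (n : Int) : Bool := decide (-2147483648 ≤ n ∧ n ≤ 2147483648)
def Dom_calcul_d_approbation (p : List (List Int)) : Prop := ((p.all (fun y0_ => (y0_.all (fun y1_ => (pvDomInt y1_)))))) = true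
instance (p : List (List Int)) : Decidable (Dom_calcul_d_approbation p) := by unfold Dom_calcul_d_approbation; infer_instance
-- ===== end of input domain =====

-- B replaces A's column-pair-major triple loop by one row-major pass that sparsely
-- accumulates a signed difference per pair; per-pair work arises only from rows that actually hold 1/0 there (measured faster in a timing run).

-- ===== PORT A =====
-- dict keyed by the pair (k, j) is PySem.Dict with key [k, j] : List Int; the port returns .items.
-- Indexing a[k]/a[j] is ported with pyGetD: under Pre_ every read is in range, so the default 0 is never used.
def calcul_d_approbation (p : List (List Int)) : List (List Int × Int) :=
  let m : Int := ((p.headD []).length : Int)   -- len(p[0]); p ≠ [] under Pre_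
  ((PySem.List.pyRange 0 m).foldl (fun d k =>
    (PySem.List.pyRange (k + 1) m).foldl (fun d j =>
      let n := p.foldl (fun (n : Int × Int) a =>
        if PySem.List.pyGetD a k 0 == 1 && PySem.List.pyGetD a j 0 == 0 then (n.1 + 1, n.2)
        else if PySem.List.pyGetD a k 0 == 0 && PySem.List.pyGetD a j 0 == 1 then (n.1, n.2 + 1)
        else n) ((0 : Int), (0 : Int))
      d.insert [k, j] |n.1 - n.2|) d) (PySem.Dict.empty : PySem.Dict (List Int) Int)).items

-- ===== PORT B =====
def calcul_d_approbation_alt (p : List (List Int)) : List (List Int × Int) :=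
  let m : Int := ((p.headD []).length : Int)   -- len(p[0]); p ≠ [] under Pre_
  let delta : PySem.Dict (List Int) Int := p.foldl (fun d a =>
    let ones := (PySem.List.pyRange 0 m).filter (fun k => PySem.List.pyGetD a k 0 == 1)
    let zeros := (PySem.List.pyRange 0 m).filter (fun j => PySem.List.pyGetD a j 0 == 0)
    ones.foldl (fun d k => zeros.foldl (fun d j =>
      if k < j then d.insert [k, j] (d.getD [k, j] 0 + 1)
      else d.insert [j, k] (d.getD [j, k] 0 - 1)) d) d) PySem.Dict.empty
  ((PySem.List.pyRange 0 m).foldl (fun d k =>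
    (PySem.List.pyRange (k + 1) m).foldl (fun d j =>
      d.insert [k, j] |delta.getD [k, j] 0|) d) (PySem.Dict.empty : PySem.Dict (List Int) Int)).items

-- ===== PRECONDITION & SPEC =====
-- Pre_ excludes the empty list (A raises IndexError on p[0]) and ragged inputs with a row shorter
-- than the first row: there A raises IndexError except in rare short-circuit cases where it still
-- returns (then B raises; see the cite in claim.json).
def Pre_calcul_d_approbation (p : List (List Int)) : Prop :=
  p ≠ [] ∧ ∀ a ∈ p, (p.headD []).length ≤ a.length
instance (p : List (List Int)) : Decidable (Pre_calcul_d_approbation p) := by unfold Pre_calcul_d_approbation; infer_instance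

def pvWitness_calcul_d_approbation : List (List Int) := [[1, 0], [0, 1], [1, 1]]

def Spec_calcul_d_approbation (p : List (List Int)) (out : List (List Int × Int)) : Prop := out = calcul_d_approbation_alt p
instance (p : List (List Int)) (out : List (List Int × Int)) : Decidable (Spec_calcul_d_approbation p out) := by unfold Spec_calcul_d_approbation; infer_instance

-- ===== CLAIM (what is proved, stated in full; the proofs are below) =====
def Claim_equal_calcul_d_approbation : Prop := ∀ (p : List (List Int)), Dom_calcul_d_approbation p → Pre_calcul_d_approbation p → Spec_calcul_d_approbation p (calcul_d_approbation p)

-- ===== LEMMAS AND PROOFS =====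

-- per-row signed contribution counted by A's inner scan at pair (k, j)
def pvC (k j : Int) (a : List Int) : Int :=
  if PySem.List.pyGetD a k 0 == 1 && PySem.List.pyGetD a j 0 == 0 then 1
  else if PySem.List.pyGetD a k 0 == 0 && PySem.List.pyGetD a j 0 == 1 then (-1) else 0

-- effect of one update of B's inner loop (for indices k' ∈ ones, j' ∈ zeros) on key [k, j]
def pvD (k j k' j' : Int) : Int :=
  if k' < j' then (if k' = k ∧ j' = j then 1 else 0)
  else (if j' = k ∧ k' = j then (-1) else 0)

-- per-row total effect of B's double loop on key [k, j]
def pvS (m k j : Int) (a : List Int) : Int :=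
  (((PySem.List.pyRange 0 m).filter (fun k' => PySem.List.pyGetD a k' 0 == 1)).map (fun k' =>
    (((PySem.List.pyRange 0 m).filter (fun j' => PySem.List.pyGetD a j' 0 == 0)).map (pvD k j k')).sum)).sum

lemma afold_diff (k j : Int) (p : List (List Int)) : ∀ x y : Int,
    (p.foldl (fun (n : Int × Int) a =>
        if PySem.List.pyGetD a k 0 == 1 && PySem.List.pyGetD a j 0 == 0 then (n.1 + 1, n.2)
        else if PySem.List.pyGetD a k 0 == 0 && PySem.List.pyGetD a j 0 == 1 then (n.1, n.2 + 1)
        else n) (x, y)).1 -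
    (p.foldl (fun (n : Int × Int) a =>
        if PySem.List.pyGetD a k 0 == 1 && PySem.List.pyGetD a j 0 == 0 then (n.1 + 1, n.2)
        else if PySem.List.pyGetD a k 0 == 0 && PySem.List.pyGetD a j 0 == 1 then (n.1, n.2 + 1)
        else n) (x, y)).2 = x - y + (p.map (pvC k j)).sum := by
  induction p with
  | nil => simp
  | cons a p ih =>
    intro x y
    simp only [List.foldl_cons, List.map_cons, List.sum_cons]
    by_cases h1 : (PySem.List.pyGetD a k 0 == 1 && PySem.List.pyGetD a j 0 == 0) = true
    · simp only [h1, if_pos, pvC, ih]; ring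
    · by_cases h2 : (PySem.List.pyGetD a k 0 == 0 && PySem.List.pyGetD a j 0 == 1) = true
      · simp only [h1, h2, pvC, ih]; simp; ring
      · simp only [pvC, h1, h2, ih]; simp

lemma zfold_getD (k j k' : Int) (zeros : List Int) : ∀ d : PySem.Dict (List Int) Int,
    (zeros.foldl (fun d j' =>
      if k' < j' then d.insert [k', j'] (d.getD [k', j'] 0 + 1)
      else d.insert [j', k'] (d.getD [j', k'] 0 - 1)) d).getD [k, j] 0
    = d.getD [k, j] 0 + (zeros.map (pvD k j k')).sum := by
  induction zeros with
  | nil => simp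
  | cons j' zs ih =>
    intro d
    simp only [List.foldl_cons, List.map_cons, List.sum_cons, ih]
    by_cases hlt : k' < j'
    · simp only [hlt, if_pos, pvD, PySem.Dict.getD_insert]
      by_cases he : ([k, j] : List Int) = [k', j']
      · have h1 : k' = k ∧ j' = j := by
          simp at he; exact ⟨he.1.symm, he.2.symm⟩
        simp [he, h1]; ring
      · have h1 : ¬ (k' = k ∧ j' = j) := by
          rintro ⟨rfl, rfl⟩; exact he rfl
        simp [he, h1]
    · simp only [hlt, if_false, pvD, PySem.Dict.getD_insert]
      by_cases he : ([k, j] : List Int) = [j', k']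
      · have h1 : j' = k ∧ k' = j := by
          simp at he; exact ⟨he.1.symm, he.2.symm⟩
        simp [he, h1]; ring
      · have h1 : ¬ (j' = k ∧ k' = j) := by
          rintro ⟨rfl, rfl⟩; exact he rfl
        simp [he, h1]

lemma ofold_getD (k j : Int) (zeros ones : List Int) : ∀ d : PySem.Dict (List Int) Int,
    (ones.foldl (fun d k' => zeros.foldl (fun d j' =>
      if k' < j' then d.insert [k', j'] (d.getD [k', j'] 0 + 1)
      else d.insert [j', k'] (d.getD [j', k'] 0 - 1)) d) d).getD [k, j] 0
    = d.getD [k, j] 0 + (ones.map (fun k' => (zeros.map (pvD k j k')).sum)).sum := by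
  induction ones with
  | nil => simp
  | cons k' os ih =>
    intro d
    simp only [List.foldl_cons, List.map_cons, List.sum_cons, ih, zfold_getD]
    ring

lemma pfold_getD (m k j : Int) (p : List (List Int)) : ∀ d : PySem.Dict (List Int) Int,
    (p.foldl (fun d a =>
      let ones := (PySem.List.pyRange 0 m).filter (fun k => PySem.List.pyGetD a k 0 == 1)
      let zeros := (PySem.List.pyRange 0 m).filter (fun j => PySem.List.pyGetD a j 0 == 0)
      ones.foldl (fun d k => zeros.foldl (fun d j =>
        if k < j then d.insert [k, j] (d.getD [k, j] 0 + 1)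
        else d.insert [j, k] (d.getD [j, k] 0 - 1)) d) d) d).getD [k, j] 0
    = d.getD [k, j] 0 + (p.map (pvS m k j)).sum := by
  induction p with
  | nil => simp
  | cons a p ih =>
    intro d
    simp only [List.foldl_cons, List.map_cons, List.sum_cons, ih, ofold_getD, pvS]
    ring

lemma sum_two_support (l : List Int) (f : Int → Int) (x y : Int) (hxy : x ≠ y)
    (h : ∀ z ∈ l, z ≠ x → z ≠ y → f z = 0) :
    (l.map f).sum = l.count x * f x + l.count y * f y := by
  induction l with
  | nil => simp
  | cons z l ih =>
    have hz := h z (by simp)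
    have ih' := ih (fun w hw => h w (by simp [hw]))
    simp only [List.map_cons, List.sum_cons, List.count_cons, ih']
    by_cases h1 : z = x
    · subst h1; simp [hxy]; ring
    · by_cases h2 : z = y
      · subst h2; simp [Ne.symm hxy]; ring
      · simp [h1, h2, hz h1 h2]

lemma count_filter_pyRange (mn : Nat) (xn : Nat) (hx : xn < mn) (P : Int → Bool) :
    ((PySem.List.pyRange 0 (mn : Int)).filter P).count (xn : Int)
    = if P (xn : Int) then 1 else 0 := by
  have hnd : ((PySem.List.pyRange 0 (mn : Int)).filter P).Nodup := by
    rw [PySem.List.pyRange_zero_natCast]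
    exact ((List.nodup_range).map (fun a b => by exact_mod_cast id)).filter _
  by_cases hp : P (xn : Int) = true
  · have hm : (xn : Int) ∈ (PySem.List.pyRange 0 (mn : Int)).filter P := by
      rw [List.mem_filter]
      exact ⟨PySem.List.mem_pyRange_one.mpr ⟨by positivity, by exact_mod_cast hx⟩, hp⟩
    simp [hp, List.count_eq_one_of_mem hnd hm]
  · have hm : (xn : Int) ∉ (PySem.List.pyRange 0 (mn : Int)).filter P := by
      rw [List.mem_filter]; rintro ⟨-, h⟩; exact hp h
    simp [hp, List.count_eq_zero_of_not_mem hm]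

lemma row_eq (mn kn jn : Nat) (hkj : kn < jn) (hj : jn < mn) (a : List Int) :
    pvS (mn : Int) (kn : Int) (jn : Int) a = pvC (kn : Int) (jn : Int) a := by
  set k : Int := (kn : Int) with hk
  set j : Int := (jn : Int) with hjdef
  have hkm : kn < mn := lt_trans hkj hj
  have hkj' : k < j := by rw [hk, hjdef]; exact_mod_cast hkj
  have hne : k ≠ j := ne_of_lt hkj'
  set zeros : List Int := (PySem.List.pyRange 0 (mn : Int)).filter (fun j' => PySem.List.pyGetD a j' 0 == 0) with hz
  set ones : List Int := (PySem.List.pyRange 0 (mn : Int)).filter (fun k' => PySem.List.pyGetD a k' 0 == 1) with ho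
  have vkj : pvD k j k j = 1 := by simp [pvD, hkj']
  have vkk : pvD k j k k = 0 := by simp [pvD, hne]
  have vjk : pvD k j j k = -1 := by simp [pvD, not_lt.mpr (le_of_lt hkj')]
  have vjj : pvD k j j j = 0 := by simp [pvD, Ne.symm hne]
  have inner_k : (zeros.map (pvD k j k)).sum = zeros.count j := by
    rw [sum_two_support zeros (pvD k j k) j k (Ne.symm hne) ?_]
    · rw [vkj, vkk]; ring
    · intro z hzm hz1 hz2
      simp only [pvD]
      split_ifs <;> simp_all
  have inner_j : (zeros.map (pvD k j j)).sum = -(zeros.count k : Int) := by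
    rw [sum_two_support zeros (pvD k j j) k j hne ?_]
    · rw [vjk, vjj]; ring
    · intro z hzm hz1 hz2
      simp only [pvD]
      split_ifs <;> simp_all
  have outer : pvS (mn : Int) k j a
      = ones.count k * (zeros.count j : Int) + ones.count j * (-(zeros.count k : Int)) := by
    rw [pvS, ← ho, ← hz]
    rw [sum_two_support ones _ k j hne ?_]
    · rw [inner_k, inner_j]
    · intro z hzm hz1 hz2
      have hall : ∀ j', pvD k j z j' = 0 := by
        intro j'
        simp only [pvD]
        split_ifs <;> simp_all
      rw [List.map_congr_left (fun x _ => hall x)]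
      simp
  rw [outer]
  have c1k : (ones.count k : Int) = if PySem.List.pyGetD a k 0 == 1 then 1 else 0 := by
    rw [ho, hk, count_filter_pyRange mn kn hkm _]; split_ifs <;> simp
  have c1j : (ones.count j : Int) = if PySem.List.pyGetD a j 0 == 1 then 1 else 0 := by
    rw [ho, hjdef, count_filter_pyRange mn jn hj _]; split_ifs <;> simp
  have c0k : (zeros.count k : Int) = if PySem.List.pyGetD a k 0 == 0 then 1 else 0 := by
    rw [hz, hk, count_filter_pyRange mn kn hkm _]; split_ifs <;> simp
  have c0j : (zeros.count j : Int) = if PySem.List.pyGetD a j 0 == 0 then 1 else 0 := by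
    rw [hz, hjdef, count_filter_pyRange mn jn hj _]; split_ifs <;> simp
  rw [c1k, c1j, c0k, c0j, pvC]
  by_cases hA : (PySem.List.pyGetD a k 0 == 1) = true <;>
    by_cases hB : (PySem.List.pyGetD a k 0 == 0) = true <;>
      by_cases hC : (PySem.List.pyGetD a j 0 == 1) = true <;>
        by_cases hD : (PySem.List.pyGetD a j 0 == 0) = true <;>
          simp_all

-- ===== VERDICT (by name: the statement is the Claim_ definition above) =====
theorem calcul_d_approbation_spec : Claim_equal_calcul_d_approbation := by
  intro p _hd _hp
  unfold Spec_calcul_d_approbation calcul_d_approbation calcul_d_approbation_alt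
  refine congrArg PySem.Dict.items ?_
  apply PySem.List.foldl_congr_mem
  intro d k hk
  apply PySem.List.foldl_congr_mem
  intro d' j hj
  obtain ⟨hk0, hkm⟩ := PySem.List.mem_pyRange_one.mp hk
  obtain ⟨hj0, hjm⟩ := PySem.List.mem_pyRange_one.mp hj
  have hkn : k = ((k.toNat : Nat) : Int) := (Int.toNat_of_nonneg hk0).symm
  have hj0' : (0 : Int) ≤ j := le_trans (by omega) hj0
  have hjn : j = ((j.toNat : Nat) : Int) := (Int.toNat_of_nonneg hj0').symm
  have hkjn : k.toNat < j.toNat := by omega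
  have hjmn : j.toNat < (p.headD []).length := by omega
  refine congrArg (PySem.Dict.insert d' [k, j]) (congrArg (fun z : Int => |z|) ?_)
  rw [afold_diff k j p 0 0, pfold_getD ((p.headD []).length : Int) k j p PySem.Dict.empty,
    PySem.Dict.getD_empty]
  have hca : ∀ a ∈ p, pvC k j a = pvS ((p.headD []).length : Int) k j a := by
    intro a _
    have h := (row_eq (p.headD []).length k.toNat j.toNat hkjn hjmn a).symm
    rw [← hkn, ← hjn] at h
    exact h
  rw [List.map_congr_left hca]
  ring
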